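-- pv_equiv track=rewrite | github.com/luiz-david05/ALG-2023.1 | lista-07-vetores/vetores_utils.py | criar_vetor_b
-- ===== SOURCE A (Python) =====
-- def criar_vetor_v2(tamanho):
--     vetor = [0] * tamanho
--     return vetor
--
-- def criar_vetor_b(vetor_a):
--     vetor_b = criar_vetor_v2(0)
--
--     indice = 0
--     for elemento in vetor_a:
--         if indice % 2 == 0:
--             vetor_b.append(0)
--         else:
--             vetor_b.append(1)
--         indice += 1
--     return vetor_b
-- ===== SOURCE B (Python) =====
-- def criar_vetor_b(vetor_a):
--     n = len(vetor_a)
--     return ([0, 1] * ((n + 1) // 2))[:n]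
-- ===== Notes on version B (the rewrite author's own statement) =====
-- stated objective: idiomatic
-- what changed: Replaces the counted loop with a parity branch and per-element appends by building the alternating pattern via repetition of the two-element block ceil(n/2) times and truncating to length n.
import Mathlib
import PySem

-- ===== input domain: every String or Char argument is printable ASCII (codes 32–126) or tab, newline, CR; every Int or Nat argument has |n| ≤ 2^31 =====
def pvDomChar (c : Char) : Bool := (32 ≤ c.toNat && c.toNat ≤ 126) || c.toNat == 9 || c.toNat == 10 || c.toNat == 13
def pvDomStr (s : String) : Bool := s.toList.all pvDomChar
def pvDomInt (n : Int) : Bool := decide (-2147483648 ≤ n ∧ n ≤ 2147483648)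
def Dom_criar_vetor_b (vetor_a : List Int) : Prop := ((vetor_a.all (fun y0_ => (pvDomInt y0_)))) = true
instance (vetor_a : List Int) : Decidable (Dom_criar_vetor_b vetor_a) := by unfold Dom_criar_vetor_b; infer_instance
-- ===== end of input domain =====

-- B replaces A's counted loop (parity branch + append) by building the alternating
-- pattern with list repetition [0,1]*ceil(n/2) truncated to length n (idiomatic).

-- ===== PORT A =====
def criar_vetor_v2 (tamanho : Int) : List Int :=
  List.replicate tamanho.toNat 0   -- [0] * tamanho (negative repeats give [])

def criar_vetor_b (vetor_a : List Int) : List Int :=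
  (vetor_a.foldl (fun (st : List Int × Int) _ =>
      (st.1 ++ [if st.2 % 2 = 0 then (0 : Int) else 1], st.2 + 1))
    (criar_vetor_v2 0, 0)).1

-- ===== PORT B =====
def criar_vetor_b_alt (vetor_a : List Int) : List Int :=
  let n : Int := vetor_a.length
  PySem.List.slice (List.flatten (List.replicate (PySem.Int.floordiv (n + 1) 2).toNat ([0, 1] : List Int))) none (some n)

-- ===== PRECONDITION & SPEC =====
def Spec_criar_vetor_b (vetor_a : List Int) (out : List Int) : Prop := out = criar_vetor_b_alt vetor_a
instance (vetor_a : List Int) (out : List Int) : Decidable (Spec_criar_vetor_b vetor_a out) := by unfold Spec_criar_vetor_b; infer_instance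

-- ===== CLAIM =====
def Claim_equal_criar_vetor_b : Prop := ∀ (vetor_a : List Int), Dom_criar_vetor_b vetor_a → Spec_criar_vetor_b vetor_a (criar_vetor_b vetor_a)

-- ===== LEMMAS AND PROOFS =====

/-- alternating suffix: `b` = "next element is 0". -/
def pvAlt : Bool → Nat → List Int
  | _, 0 => []
  | b, n + 1 => (if b then (0 : Int) else 1) :: pvAlt (!b) n

theorem pvAlt_take (b : Bool) (n m : Nat) (h : n ≤ m) :
    (pvAlt b m).take n = pvAlt b n := by
  induction n generalizing b m with
  | zero => simp [pvAlt]
  | succ k ih =>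
    cases m with
    | zero => omega
    | succ m' => simp [pvAlt, ih (!b) m' (by omega)]

theorem pvAlt_flatten (k : Nat) :
    List.flatten (List.replicate k ([0, 1] : List Int)) = pvAlt true (2 * k) := by
  induction k with
  | zero => simp [pvAlt]
  | succ k ih =>
    have : 2 * (k + 1) = (2 * k) + 1 + 1 := by omega
    simp [List.replicate_succ, this, pvAlt, ih]

theorem pvA_loop (xs : List Int) (acc : List Int) (i : Int) :
    (xs.foldl (fun (st : List Int × Int) _ =>
        (st.1 ++ [if st.2 % 2 = 0 then (0 : Int) else 1], st.2 + 1)) (acc, i)).1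
    = acc ++ pvAlt (decide (i % 2 = 0)) xs.length := by
  induction xs generalizing acc i with
  | nil => simp [pvAlt]
  | cons x xs ih =>
    simp only [List.foldl_cons, List.length_cons]
    rw [ih]
    have hflip : decide ((i + 1) % 2 = 0) = !decide (i % 2 = 0) := by
      by_cases h : i % 2 = 0
      · have : (i + 1) % 2 = 1 := by omega
        simp [h, this]
      · have : (i + 1) % 2 = 0 := by omega
        simp [h, this]
    rw [hflip]
    by_cases h : i % 2 = 0 <;> simp [h, pvAlt, List.append_assoc]

-- ===== VERDICT =====
theorem criar_vetor_b_spec : Claim_equal_criar_vetor_b := by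
  intro xs _
  unfold Spec_criar_vetor_b criar_vetor_b criar_vetor_b_alt criar_vetor_v2
  rw [pvA_loop]
  have hk : (PySem.Int.floordiv ((xs.length : Int) + 1) 2).toNat = (xs.length + 1) / 2 := by
    have : ((xs.length : Int) + 1) = ((xs.length + 1 : Nat) : Int) := by push_cast; ring
    rw [this, PySem.Int.floordiv, Int.fdiv_eq_ediv_of_nonneg _ (by positivity)]
    omega
  simp only [hk, pvAlt_flatten]
  rw [PySem.List.slice_to_natCast]
  rw [pvAlt_take true xs.length (2 * ((xs.length + 1) / 2)) (by omega)]
  rfl
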